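-- pv_equiv track=rewrite | github.com/ptrdmr/django_doc | apps/reports/utils/medication_utils.py | group_medications_by_class
-- ===== SOURCE A (Python) =====
-- from typing import Dict, List, Any, Optional
--
-- def group_medications_by_class(medications: List[Dict[str, Any]]) -> Dict[str, List[Dict[str, Any]]]:
--     """
--     Group medications by therapeutic class.
--
--     Args:
--         medications: List of medication dictionaries
--
--     Returns:
--         Dictionary mapping therapeutic class to list of medications
--     """
--     grouped = {}
--
--     for med in medications:
--         class_name = med.get('therapeutic_class', 'Other')
--         if class_name not in grouped:
--             grouped[class_name] = []
--         grouped[class_name].append(med)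
--
--     # Sort class names alphabetically
--     return dict(sorted(grouped.items()))
-- ===== SOURCE B (Python) =====
-- from typing import Dict, List, Any
--
--
-- def group_medications_by_class(medications: List[Dict[str, Any]]) -> Dict[str, List[Dict[str, Any]]]:
--     """
--     Group medications by therapeutic class.
--
--     Sort-then-scan: stably sort the medications by class name, then walk the
--     sorted list once, cutting it into maximal runs of equal class; the runs
--     come out already in alphabetical key order, and within each run the
--     original order is preserved by sort stability.
--     """
--     def key(med):
--         return med.get('therapeutic_class', 'Other')
--
--     ordered = sorted(medications, key=key)
--     result = {}
--     i = 0
--     n = len(ordered)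
--     while i < n:
--         k = key(ordered[i])
--         j = i + 1
--         while j < n and key(ordered[j]) == k:
--             j += 1
--         result[k] = ordered[i:j]
--         i = j
--     return result
-- ===== Notes on version B (the rewrite author's own statement) =====
-- stated objective: alternative
-- what changed: A accumulates per-class lists in a dict keyed by first appearance and then sorts the dict items; B stably sorts the medications by class name once and cuts the sorted list into maximal equal-class runs, which come out already in alphabetical key order.
import Mathlib
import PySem

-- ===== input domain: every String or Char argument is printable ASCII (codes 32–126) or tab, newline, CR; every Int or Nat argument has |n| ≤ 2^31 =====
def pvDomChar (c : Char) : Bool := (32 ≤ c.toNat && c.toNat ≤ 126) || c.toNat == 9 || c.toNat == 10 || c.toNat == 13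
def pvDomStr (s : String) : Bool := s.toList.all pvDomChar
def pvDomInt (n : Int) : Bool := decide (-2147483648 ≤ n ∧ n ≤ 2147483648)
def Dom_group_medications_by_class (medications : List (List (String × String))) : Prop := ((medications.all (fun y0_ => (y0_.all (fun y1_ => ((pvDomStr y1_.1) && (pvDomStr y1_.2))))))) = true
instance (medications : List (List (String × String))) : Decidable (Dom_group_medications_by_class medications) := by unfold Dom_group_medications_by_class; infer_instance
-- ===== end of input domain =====

-- B replaces A's dict-accumulate-then-sort-the-items with a stable sort of the
-- medications by class followed by one scan cutting the sorted list into runs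
-- (objective: alternative decomposition, same result).

-- med.get('therapeutic_class', 'Other'): first match in the association list (both Pythons contain this lookup)
def pvClass (med : List (String × String)) : String :=
  (PySem.Dict.mk med).getD "therapeutic_class" "Other"

-- ===== PORT A =====
def group_medications_by_class (medications : List (List (String × String))) : List (String × List (List (String × String))) :=
  let grouped := medications.foldl (fun g med =>
    let cn := pvClass med
    let g := if g.contains cn then g else g.insert cn []   -- if class_name not in grouped: grouped[class_name] = []
    g.insert cn (g.getD cn [] ++ [med]))                   -- grouped[class_name].append(med)
    PySem.Dict.empty
  -- sorted(grouped.items()): the keys are distinct, so Python's tuple comparison only ever reads the first component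
  PySem.List.sorted grouped.items (fun p => p.1)

-- ===== PORT B =====
-- the outer while-loop of Source B: each step takes the run ordered[i:j] of equal class and continues at i = j
def pvRuns : List (List (String × String)) → List (String × List (List (String × String)))
  | [] => []
  | med :: rest =>
    let k := pvClass med
    (k, med :: rest.takeWhile (fun y => pvClass y == k)) ::
      pvRuns (rest.dropWhile (fun y => pvClass y == k))
  termination_by l => l.length
  decreasing_by
    simp only [List.length_cons]
    exact Nat.lt_succ_of_le (List.length_dropWhile_le _ _)

def group_medications_by_class_alt (medications : List (List (String × String))) : List (String × List (List (String × String))) :=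
  pvRuns (PySem.List.sorted medications pvClass)

-- ===== PRECONDITION & SPEC =====
def Spec_group_medications_by_class (medications : List (List (String × String))) (out : List (String × List (List (String × String)))) : Prop := out = group_medications_by_class_alt medications
instance (medications : List (List (String × String))) (out : List (String × List (List (String × String)))) : Decidable (Spec_group_medications_by_class medications out) := by unfold Spec_group_medications_by_class; infer_instance

-- ===== CLAIM (what is proved, stated in full; the proofs are below) =====
def Claim_equal_group_medications_by_class : Prop := ∀ (medications : List (List (String × String))), Dom_group_medications_by_class medications → Spec_group_medications_by_class medications (group_medications_by_class medications)

-- ===== LEMMAS AND PROOFS =====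

-- the common value both ports are shown to equal: classes sorted, each class with
-- the medications of that class in original order
def pvKeyList (medications : List (List (String × String))) : List String :=
  PySem.List.sorted (PySem.Set.ofList (medications.map pvClass)) (fun k => k)

def pvCanon (medications : List (List (String × String))) : List (String × List (List (String × String))) :=
  (pvKeyList medications).map (fun k => (k, medications.filter (fun m => pvClass m == k)))

-- A's loop body (setdefault-then-append) is one Dict.modify
lemma pv_stepA_eq_modify :
    (fun (g : PySem.Dict String (List (List (String × String)))) med =>
      let cn := pvClass med
      let g := if g.contains cn then g else g.insert cn []
      g.insert cn (g.getD cn [] ++ [med]))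
    = (fun g med => g.modify (pvClass med) [] (· ++ [med])) := by
  funext g med
  by_cases h : g.contains (pvClass med)
  · simp [h, PySem.Dict.modify]
  · simp [h, PySem.Dict.modify, PySem.Dict.insert_insert_self,
      PySem.Dict.getD_insert_self, PySem.Dict.getD_of_not_contains _ _ (by simpa using h)]

-- A's dict maps each class to the medications of that class, in original order
lemma pv_grouped_getD (medications : List (List (String × String))) (k : String) :
    (medications.foldl (fun d m => d.modify (pvClass m) [] (· ++ [m])) PySem.Dict.empty).getD k []
      = medications.filter (fun m => pvClass m == k) := by
  have h := PySem.Dict.getD_foldl_modify_append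
      (medications.map (fun m => (pvClass m, m))) (PySem.Dict.empty) k
  rw [List.foldl_map] at h
  simpa [List.filter_map, Function.comp_def] using h

lemma pv_A_eq_canon (medications : List (List (String × String))) :
    group_medications_by_class medications = pvCanon medications := by
  unfold group_medications_by_class
  rw [pv_stepA_eq_modify]
  set gr := medications.foldl (fun d m => d.modify (pvClass m) [] (· ++ [m])) PySem.Dict.empty with hgr
  have hnd : gr.keys.Nodup := by
    rw [hgr]
    exact PySem.Dict.nodup_keys_foldl_modify_key medications pvClass [] (fun _ m => (· ++ [m])) _
      PySem.Dict.nodup_keys_empty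
  have hkeys : gr.keys = PySem.Set.ofList (medications.map pvClass) := by
    rw [hgr]
    rw [PySem.Dict.keys_foldl_modify_key medications pvClass [] (fun _ m => (· ++ [m])) _]
    rfl
  have hitems : gr.items = (PySem.Set.ofList (medications.map pvClass)).map
      (fun k => (k, medications.filter (fun m => pvClass m == k))) := by
    rw [PySem.Dict.items_eq_map_keys gr hnd [], hkeys]
    exact List.map_congr_left (fun k _ => by rw [hgr, pv_grouped_getD])
  show PySem.List.sorted gr.items (fun p => p.1) = pvCanon medications
  rw [hitems]
  unfold pvCanon pvKeyList
  apply PySem.List.sorted_eq_of_perm_of_pairwise_lt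
  · exact List.Perm.map _ (PySem.List.sorted_perm _ _ _)
  · rw [List.pairwise_map]
    exact PySem.List.sorted_ofList_pairwise_lt _

-- the deduplicated list is a sublist of its source
lemma pv_ofList_sublist (l : List String) : (PySem.Set.ofList l).Sublist l := by
  induction l using List.reverseRecOn with
  | nil => simp [PySem.Set.ofList, PySem.Set.empty]
  | append_singleton xs x ih =>
    rw [PySem.Set.ofList_append_singleton]
    unfold PySem.Set.add
    by_cases h : x ∈ PySem.Set.ofList xs
    · simpa [PySem.Set.contains, h] using ih.trans (List.sublist_append_left xs [x])
    · simpa [PySem.Set.contains, h] using ih.append (List.Sublist.refl [x])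

lemma pv_pairwise_lt_ofList (l : List String) (h : l.Pairwise (· ≤ ·)) :
    (PySem.Set.ofList l).Pairwise (· < ·) := by
  have hle := List.Pairwise.sublist (pv_ofList_sublist l) h
  have hnd : (PySem.Set.ofList l).Pairwise (· ≠ ·) := PySem.Set.nodup_ofList l
  exact (hle.and hnd).imp (fun ⟨a, b⟩ => lt_of_le_of_ne a b)

-- deduplication commutes with filtering
lemma pv_filter_ofList (p : String → Bool) (l : List String) :
    (PySem.Set.ofList l).filter p = PySem.Set.ofList (l.filter p) := by
  induction l using List.reverseRecOn with
  | nil => simp [PySem.Set.ofList, PySem.Set.empty]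
  | append_singleton xs x ih =>
    rw [PySem.Set.ofList_append_singleton, List.filter_append]
    by_cases hpx : p x
    · have hfx : List.filter p [x] = [x] := by simp [hpx]
      rw [hfx, PySem.Set.ofList_append_singleton]
      by_cases hm : x ∈ xs
      · have h1 : PySem.Set.add (PySem.Set.ofList xs) x = PySem.Set.ofList xs := by
          simp [PySem.Set.add, PySem.Set.contains, (PySem.Set.mem_ofList xs x).mpr hm]
        have h2 : PySem.Set.add (PySem.Set.ofList (xs.filter p)) x = PySem.Set.ofList (xs.filter p) := by
          simp [PySem.Set.add, PySem.Set.contains,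
            (PySem.Set.mem_ofList (xs.filter p) x).mpr (List.mem_filter.mpr ⟨hm, hpx⟩)]
        rw [h1, h2, ih]
      · have h1 : PySem.Set.add (PySem.Set.ofList xs) x = PySem.Set.ofList xs ++ [x] := by
          simp [PySem.Set.add, PySem.Set.contains, hm]
        have h2 : PySem.Set.add (PySem.Set.ofList (xs.filter p)) x = PySem.Set.ofList (xs.filter p) ++ [x] := by
          simp [PySem.Set.add, PySem.Set.contains, hm]
        rw [h1, h2, List.filter_append, ih]
        simp [hpx]
    · have hfx : List.filter p [x] = [] := by simp [hpx]
      rw [hfx, List.append_nil]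
      by_cases hm : x ∈ PySem.Set.ofList xs
      · have h1 : PySem.Set.add (PySem.Set.ofList xs) x = PySem.Set.ofList xs := by
          simp [PySem.Set.add, PySem.Set.contains, hm]
        rw [h1, ih]
      · have h1 : PySem.Set.add (PySem.Set.ofList xs) x = PySem.Set.ofList xs ++ [x] := by
          simp [PySem.Set.add, PySem.Set.contains, hm]
        rw [h1, List.filter_append, ih]
        simp [hpx]

-- after the run at class k is dropped, every remaining class differs from k (sortedness)
lemma pv_drop_ne (k : String) : ∀ (rest : List (List (String × String))),
    (∀ y ∈ rest, k ≤ pvClass y) →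
    rest.Pairwise (fun a b => pvClass a ≤ pvClass b) →
    ∀ y ∈ rest.dropWhile (fun z => pvClass z == k), pvClass y ≠ k := by
  intro rest
  induction rest with
  | nil => simp
  | cons h t ih =>
    intro hge hpw
    rw [List.dropWhile_cons]
    by_cases hph : pvClass h == k
    · simp only [hph, if_true]
      exact ih (fun y hy => hge y (List.mem_cons_of_mem _ hy)) hpw.of_cons
    · simp only [hph, Bool.false_eq_true, if_false]
      intro y hy
      rcases List.mem_cons.mp hy with rfl | hyt
      · exact fun hc => hph (by simp [hc])
      · have h1 : k ≤ pvClass h := hge h (List.mem_cons_self)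
        have h2 : pvClass h ≤ pvClass y := (List.pairwise_cons.mp hpw).1 y hyt
        have h3 : pvClass h ≠ k := fun hc => hph (by simp [hc])
        intro hc
        rw [hc] at h2
        exact h3 (le_antisymm h2 h1)

lemma pvRuns_nil : pvRuns [] = [] := by rw [pvRuns]

-- run-cutting a class-sorted list yields exactly (sorted distinct classes, their filters)
lemma pv_runs_spec : ∀ (n : Nat) (l : List (List (String × String))), l.length ≤ n →
    l.Pairwise (fun a b => pvClass a ≤ pvClass b) →
    pvRuns l = (PySem.Set.ofList (l.map pvClass)).map
      (fun k => (k, l.filter (fun m => pvClass m == k))) := by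
  intro n
  induction n with
  | zero =>
    intro l hl _
    rw [List.length_eq_zero_iff.mp (Nat.le_zero.mp hl), pvRuns_nil]
    rfl
  | succ n ih =>
    intro l hl hpw
    match l with
    | [] => rw [pvRuns_nil]; rfl
    | med :: rest =>
      have hpwr := hpw.of_cons
      have hge : ∀ y ∈ rest, pvClass med ≤ pvClass y := (List.pairwise_cons.mp hpw).1
      set k := pvClass med with hk
      set tw := rest.takeWhile (fun y => pvClass y == k) with htw
      set dw := rest.dropWhile (fun y => pvClass y == k) with hdw
      have hsplit : tw ++ dw = rest := List.takeWhile_append_dropWhile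
      have htwk : ∀ y ∈ tw, pvClass y = k := by
        intro y hy
        rw [htw] at hy
        have := List.mem_takeWhile_imp hy
        simpa using this
      have hdwk : ∀ y ∈ dw, pvClass y ≠ k := pv_drop_ne k rest hge hpwr
      have hruns : pvRuns (med :: rest) = (k, med :: tw) :: pvRuns dw := by
        rw [pvRuns]
      have hkeys : PySem.Set.ofList ((med :: rest).map pvClass)
          = k :: PySem.Set.ofList (dw.map pvClass) := by
        rw [List.map_cons, PySem.Set.ofList_cons]
        congr 1
        show (PySem.Set.ofList (rest.map pvClass)).filter (fun y => !(y == k)) = _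
        rw [pv_filter_ofList, ← hsplit, List.map_append, List.filter_append]
        have h1 : (tw.map pvClass).filter (fun y => !(y == k)) = [] := by
          rw [List.filter_eq_nil_iff]
          intro a ha
          obtain ⟨y, hy, rfl⟩ := List.mem_map.mp ha
          simp [htwk y hy]
        have h2 : (dw.map pvClass).filter (fun y => !(y == k)) = dw.map pvClass := by
          rw [List.filter_eq_self]
          intro a ha
          obtain ⟨y, hy, rfl⟩ := List.mem_map.mp ha
          simp [hdwk y hy]
        rw [h1, h2, List.nil_append]
      have hhead : (med :: rest).filter (fun m => pvClass m == k) = med :: tw := by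
        rw [List.filter_cons_of_pos (by simp [hk]), ← hsplit, List.filter_append]
        have h1 : tw.filter (fun m => pvClass m == k) = tw :=
          List.filter_eq_self.mpr (fun a ha => by simp [htwk a ha])
        have h2 : dw.filter (fun m => pvClass m == k) = [] :=
          List.filter_eq_nil_iff.mpr (fun a ha => by simp [hdwk a ha])
        rw [h1, h2, List.append_nil]
      have htail : ∀ k' ∈ PySem.Set.ofList (dw.map pvClass),
          (med :: rest).filter (fun m => pvClass m == k') = dw.filter (fun m => pvClass m == k') := by
        intro k' hk'
        obtain ⟨y, hy, rfl⟩ := List.mem_map.mp ((PySem.Set.mem_ofList _ _).mp hk')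
        have hne : pvClass y ≠ k := hdwk y hy
        rw [List.filter_cons_of_neg (by simpa using Ne.symm hne), ← hsplit, List.filter_append]
        have h1 : tw.filter (fun m => pvClass m == pvClass y) = [] := by
          rw [List.filter_eq_nil_iff]
          intro a ha
          simp [htwk a ha, Ne.symm hne]
        rw [h1, List.nil_append]
      rw [hruns, hkeys, List.map_cons, hhead]
      have hlen : dw.length ≤ n := by
        have := List.length_dropWhile_le (fun y => pvClass y == k) rest
        have hr : rest.length ≤ n := by simpa using Nat.le_of_succ_le_succ hl
        exact le_trans (hdw ▸ this) hr
      have hpwdw : dw.Pairwise (fun a b => pvClass a ≤ pvClass b) :=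
        List.Pairwise.sublist (hdw ▸ List.dropWhile_sublist _) hpwr
      rw [ih dw hlen hpwdw]
      congr 1
      exact (List.map_congr_left (fun k' hk' => by rw [htail k' hk'])).symm

-- stability of Python's sort, one insertion: key-equal elements keep their order
lemma pv_filter_insertBy (x : List (String × String)) (k : String) :
    ∀ (ys : List (List (String × String))), ys.Pairwise (fun a b => pvClass a ≤ pvClass b) →
    (PySem.List.insertBy (fun a b => decide (pvClass a < pvClass b)) x ys).filter (fun m => pvClass m == k)
      = ys.filter (fun m => pvClass m == k) ++ (if pvClass x == k then [x] else []) := by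
  intro ys
  induction ys with
  | nil =>
    intro _
    simp [PySem.List.insertBy, List.filter_cons]
  | cons y t ih =>
    intro hpw
    rw [PySem.List.insertBy]
    by_cases hlt : pvClass x < pvClass y
    · simp only [decide_eq_true hlt, if_true]
      have hnil : (y :: t).filter (fun m => pvClass m == k) =
          (if pvClass x == k then ([] : List (List (String × String))) else (y :: t).filter (fun m => pvClass m == k)) := by
        by_cases hxk : pvClass x == k
        · rw [if_pos hxk]
          rw [List.filter_eq_nil_iff]
          intro a ha
          have hya : pvClass y ≤ pvClass a := by
            rcases List.mem_cons.mp ha with rfl | hat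
            · exact le_refl _
            · exact (List.pairwise_cons.mp hpw).1 a hat
          have : pvClass x < pvClass a := lt_of_lt_of_le hlt hya
          simp only [beq_iff_eq] at hxk ⊢
          rw [← hxk]
          exact fun hc => absurd hc (ne_of_gt this)
        · rw [if_neg hxk]
      by_cases hxk : pvClass x == k
      · rw [if_pos hxk] at hnil
        rw [List.filter_cons_of_pos (by simpa using hxk), hnil]
        simp [hxk]
      · rw [List.filter_cons_of_neg (by simpa using hxk)]
        simp [hxk]
    · simp only [decide_eq_false hlt, Bool.false_eq_true, if_false]
      rw [List.filter_cons, List.filter_cons, ih hpw.of_cons]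
      split_ifs <;> simp

-- stability of Python's sort: per-class filters are unchanged by the sort
lemma pv_filter_sorted (medications : List (List (String × String))) (k : String) :
    (PySem.List.sorted medications pvClass).filter (fun m => pvClass m == k)
      = medications.filter (fun m => pvClass m == k) := by
  induction medications using List.reverseRecOn with
  | nil => simp [PySem.List.sorted]
  | append_singleton xs x ih =>
    rw [PySem.List.sorted_eq_foldl_insertBy, List.foldl_append, List.foldl_cons, List.foldl_nil,
      ← PySem.List.sorted_eq_foldl_insertBy]
    rw [pv_filter_insertBy x k _ (PySem.List.sorted_pairwise xs pvClass), ih, List.filter_append]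
    simp [List.filter_cons]

lemma pv_B_eq_canon (medications : List (List (String × String))) :
    group_medications_by_class_alt medications = pvCanon medications := by
  unfold group_medications_by_class_alt
  set s := PySem.List.sorted medications pvClass with hs
  rw [pv_runs_spec s.length s (le_refl _) (PySem.List.sorted_pairwise medications pvClass)]
  have hkeys : PySem.Set.ofList (s.map pvClass) = pvKeyList medications := by
    unfold pvKeyList
    refine (PySem.List.sorted_eq_of_perm_of_pairwise_lt _ _ _ ?_ ?_).symm
    · rw [List.perm_ext_iff_of_nodup (PySem.Set.nodup_ofList _) (PySem.Set.nodup_ofList _)]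
      intro a
      simp only [PySem.Set.mem_ofList, List.mem_map]
      constructor
      · rintro ⟨m, hm, rfl⟩
        exact ⟨m, (PySem.List.mem_sorted medications pvClass false m).mp (hs ▸ hm), rfl⟩
      · rintro ⟨m, hm, rfl⟩
        exact ⟨m, hs ▸ (PySem.List.mem_sorted medications pvClass false m).mpr hm, rfl⟩
    · exact pv_pairwise_lt_ofList _ (PySem.List.sorted_map_key_pairwise medications pvClass)
  rw [hkeys]
  unfold pvCanon
  exact List.map_congr_left (fun k _ => by rw [hs, pv_filter_sorted])

-- ===== VERDICT (by name: the statement is the Claim_ definition above) =====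
theorem group_medications_by_class_spec : Claim_equal_group_medications_by_class := by
  intro medications _
  unfold Spec_group_medications_by_class
  rw [pv_A_eq_canon, pv_B_eq_canon]
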